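-- pv_equiv track=rewrite | github.com/nehakashyap-cmd/pseudo_pooling | id_region.py | sec_check
-- ===== SOURCE A (Python) =====
-- def generate_kmers(sequence, k):
--     kmers = []
--     for i in range(len(sequence) - k + 1):
--         kmer = sequence[i:i + k]
--         kmers.append(kmer)
--     return kmers
--
-- def ham_dist(seq_one, seq_two):
--     if len(seq_one) != len(seq_two):
--         raise ValueError("Seqs dont have the same length")
--
--     dist = sum(bp_one != bp_two for bp_one, bp_two in zip(seq_one, seq_two))
--     return dist
--
-- def sec_check(low_bound, up_bound, primer_seq, seq):
--     if((low_bound-(len(primer_seq)-1)) < 0):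
--         lower_bound = 0
--     else:
--         lower_bound = low_bound - (len(primer_seq)-1)
--     if((up_bound+(len(primer_seq)-1)) > len(seq)-1):
--         upper_bound = len(seq)-1
--     else:
--         upper_bound = up_bound+(len(primer_seq)-1)
--     narrow_seq = seq[lower_bound:upper_bound]
--     kmer_list = generate_kmers(narrow_seq, len(primer_seq))
--     min_dist=len(primer_seq)
--     offset_val = 0
--     temp = 0
--     for kmer in kmer_list:
--         dist = ham_dist(kmer, primer_seq)
--         if min_dist >= dist:
--             min_dist = dist
--             offset_val = temp
--         temp = temp + 1
--     return (lower_bound+offset_val), (lower_bound+offset_val+len(primer_seq))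
-- ===== SOURCE B (Python) =====
-- def sec_check(low_bound, up_bound, primer_seq, seq):
--     k = len(primer_seq)
--     lower_bound = max(0, low_bound - (k - 1))
--     upper_bound = min(len(seq) - 1, up_bound + (k - 1))
--     narrow = seq[lower_bound:upper_bound]
--     m = len(narrow) - k + 1
--     # column-wise accumulation: dists[i] ends up as the Hamming distance of window i
--     dists = [0] * m
--     for j, pc in enumerate(primer_seq):
--         col = narrow[j:j + m]
--         dists = [d + (c != pc) for d, c in zip(dists, col)]
--     # backward scan: first strict improvement from the right = last argmin
--     best = k + 1
--     offset_val = 0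
--     i = m - 1
--     for d in reversed(dists):
--         if d < best:
--             best = d
--             offset_val = i
--         i -= 1
--     return (lower_bound + offset_val), (lower_bound + offset_val + k)
-- ===== Notes on version B (the rewrite author's own statement) =====
-- stated objective: alternative
-- what changed: A slides a k-window over the narrowed slice computing each window's Hamming distance and keeping a running min with last-on-tie update; B transposes the loops, accumulating all window distances at once column-by-column of the primer (one zip per primer character), then picks the last argmin by a single backward scan over the reversed distance list.
import Mathlib
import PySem

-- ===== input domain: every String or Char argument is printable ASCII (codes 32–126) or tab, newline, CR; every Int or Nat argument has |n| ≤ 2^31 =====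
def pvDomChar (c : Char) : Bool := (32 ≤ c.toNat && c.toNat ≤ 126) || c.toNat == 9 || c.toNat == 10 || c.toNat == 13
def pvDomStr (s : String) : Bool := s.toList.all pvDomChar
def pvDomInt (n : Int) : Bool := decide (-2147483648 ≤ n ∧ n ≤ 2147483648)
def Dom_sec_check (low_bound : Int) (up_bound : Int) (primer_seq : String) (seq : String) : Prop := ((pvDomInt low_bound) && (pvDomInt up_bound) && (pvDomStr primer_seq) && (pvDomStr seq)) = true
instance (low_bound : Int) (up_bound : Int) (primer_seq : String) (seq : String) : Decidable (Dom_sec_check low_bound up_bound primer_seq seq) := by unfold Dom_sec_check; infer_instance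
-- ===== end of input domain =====

-- B replaces A's window-by-window running-min loop by a column-wise (transposed) accumulation of all
-- window distances followed by a backward reverse scan for the last argmin (alternative decomposition).


-- ===== PORT A =====
-- generate_kmers: append one slice per i in range(len(sequence) - k + 1)
def pvGenerateKmers (sequence : List Char) (k : Int) : List (List Char) :=
  (PySem.List.pyRange 0 ((sequence.length : Int) - k + 1) 1).foldl
    (fun kmers i => kmers ++ [PySem.List.slice sequence (some i) (some (i + k))]) []

-- ham_dist: sum(bp_one != bp_two for … in zip(…)).  A's ValueError branch is unreachable in
-- sec_check (every generated kmer has exactly length len(primer_seq)), so the port is the sum.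
def pvHamDist (seq_one seq_two : List Char) : Int :=
  ((seq_one.zip seq_two).map (fun bp => if bp.1 ≠ bp.2 then (1 : Int) else 0)).sum

-- the body of A's for-loop on state (min_dist, offset_val, temp)
def pvStep (st : Int × Int × Int) (dist : Int) : Int × Int × Int :=
  if st.1 ≥ dist then (dist, st.2.2, st.2.2 + 1) else (st.1, st.2.1, st.2.2 + 1)

def sec_check (low_bound : Int) (up_bound : Int) (primer_seq : String) (seq : String) : Int × Int :=
  let p := primer_seq.toList
  let s := seq.toList
  let lower_bound : Int :=
    if low_bound - ((p.length : Int) - 1) < 0 then 0 else low_bound - ((p.length : Int) - 1)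
  let upper_bound : Int :=
    if up_bound + ((p.length : Int) - 1) > (s.length : Int) - 1 then (s.length : Int) - 1
    else up_bound + ((p.length : Int) - 1)
  let narrow_seq := PySem.List.slice s (some lower_bound) (some upper_bound)
  let kmer_list := pvGenerateKmers narrow_seq (p.length : Int)
  let st := kmer_list.foldl (fun st kmer => pvStep st (pvHamDist kmer p))
    ((p.length : Int), 0, 0)
  (lower_bound + st.2.1, lower_bound + st.2.1 + (p.length : Int))

-- ===== PORT B =====
-- the body of B's backward loop 'for d in reversed(dists)' on state (best, offset_val, i)
def pvBStep (st : Int × Int × Int) (d : Int) : Int × Int × Int :=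
  if d < st.1 then (d, st.2.2, st.2.2 - 1) else (st.1, st.2.1, st.2.2 - 1)

def sec_check_alt (low_bound : Int) (up_bound : Int) (primer_seq : String) (seq : String) : Int × Int :=
  let p := primer_seq.toList
  let s := seq.toList
  let k : Int := p.length
  let lower_bound := max 0 (low_bound - (k - 1))
  let upper_bound := min ((s.length : Int) - 1) (up_bound + (k - 1))
  let narrow := PySem.List.slice s (some lower_bound) (some upper_bound)
  let m : Int := (narrow.length : Int) - k + 1
  -- for j, pc in enumerate(primer_seq): dists = [d + (c != pc) for d, c in zip(dists, narrow[j:j+m])]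
  let dists := (PySem.List.enumerate p 0).foldl
    (fun dists jpc =>
      List.zipWith (fun d c => d + (if c ≠ jpc.2 then (1 : Int) else 0)) dists
        (PySem.List.slice narrow (some jpc.1) (some (jpc.1 + m))))
    (List.replicate m.toNat 0)
  let st := dists.reverse.foldl pvBStep (k + 1, 0, m - 1)
  (lower_bound + st.2.1, lower_bound + st.2.1 + k)

-- ===== PRECONDITION & SPEC =====
def Spec_sec_check (low_bound : Int) (up_bound : Int) (primer_seq : String) (seq : String) (out : Int × Int) : Prop := out = sec_check_alt low_bound up_bound primer_seq seq
instance (low_bound : Int) (up_bound : Int) (primer_seq : String) (seq : String) (out : Int × Int) : Decidable (Spec_sec_check low_bound up_bound primer_seq seq out) := by unfold Spec_sec_check; infer_instance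

-- ===== CLAIM (what is proved, stated in full; the proofs are below) =====
def Claim_equal_sec_check : Prop := ∀ (low_bound : Int) (up_bound : Int) (primer_seq : String) (seq : String), Dom_sec_check low_bound up_bound primer_seq seq → Spec_sec_check low_bound up_bound primer_seq seq (sec_check low_bound up_bound primer_seq seq)

-- ===== LEMMAS AND PROOFS =====

-- the list of window Hamming distances, in drop/take form (meaningful when p.length ≤ narrow.length)
def pvWinDists (narrow p : List Char) : List Int :=
  (List.range (narrow.length - p.length + 1)).map
    (fun i => pvHamDist ((narrow.drop i).take p.length) p)

-- each 0/1 term is ≤ 1, so the Hamming sum is at most len(primer)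
lemma pvSumIte_le (xs : List (Char × Char)) :
    (xs.map (fun bp => if bp.1 ≠ bp.2 then (1 : Int) else 0)).sum ≤ (xs.length : Int) := by
  induction xs with
  | nil => simp
  | cons x t ih =>
    simp only [List.map_cons, List.sum_cons, List.length_cons]
    split <;> omega

lemma pvHamDist_le (l p : List Char) : pvHamDist l p ≤ (p.length : Int) := by
  calc pvHamDist l p ≤ ((l.zip p).length : Int) := pvSumIte_le _
    _ ≤ (p.length : Int) := by simp [List.length_zip]

-- appending one primer character adds that column's mismatch indicator
lemma pvHamSnoc (w pre : List Char) (c : Char) (h : pre.length < w.length) :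
    pvHamDist w (pre ++ [c]) = pvHamDist w pre + (if w.getD pre.length ' ' ≠ c then 1 else 0) := by
  have h1 : (w.take pre.length).length = pre.length := by
    simp [List.length_take]; omega
  have hw := (List.take_append_drop pre.length w).symm
  have hd : w.drop pre.length = w[pre.length] :: w.drop (pre.length + 1) :=
    List.drop_eq_getElem_cons h
  have hzip1 : w.zip (pre ++ [c]) =
      (w.take pre.length).zip pre ++ (w.drop pre.length).zip [c] := by
    conv_lhs => rw [hw]
    exact List.zip_append h1
  have hzip2 : w.zip pre = (w.take pre.length).zip pre := by
    have h2 := List.zip_append (l₁ := w.take pre.length) (r₁ := w.drop pre.length)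
      (l₂ := pre) (r₂ := ([] : List Char)) h1
    simp only [List.append_nil, List.zip_nil_right] at h2
    conv_lhs => rw [hw]
    simpa using h2
  have hgd : w.getD pre.length ' ' = w[pre.length] := List.getD_eq_getElem w ' ' h
  rw [pvHamDist, pvHamDist, hzip1, hzip2, hd, hgd]
  simp only [List.zip_cons_cons, List.zip_nil_right, List.map_append, List.sum_append]
  split
  · next hcc => simp [hcc]
  · next hcc => simp [not_not.1 hcc]

-- min-fold facts
lemma pvFoldMin_of_all_ge (rs : List Int) : ∀ (b : Int), (∀ y ∈ rs, b ≤ y) → rs.foldl min b = b := by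
  induction rs with
  | nil => simp
  | cons x t ih =>
    intro b h
    have hx : b ≤ x := h x (by simp)
    simp only [List.foldl_cons, min_eq_left hx]
    exact ih b (fun y hy => h y (by simp [hy]))

lemma pvFoldMin_mem_of_lt (rs : List Int) : ∀ (b : Int), (∃ y ∈ rs, y < b) →
    rs.foldl min b ∈ rs ∧ rs.foldl min b < b := by
  induction rs with
  | nil => simp
  | cons x t ih =>
    intro b h
    by_cases hx : x < b
    · simp only [List.foldl_cons, min_eq_right (le_of_lt hx)]
      by_cases h2 : ∃ y ∈ t, y < x
      · obtain ⟨hm, hlt⟩ := ih x h2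
        exact ⟨by simp [hm], lt_trans hlt hx⟩
      · push_neg at h2
        rw [pvFoldMin_of_all_ge t x h2]
        exact ⟨by simp, hx⟩
    · obtain ⟨y, hy, hyb⟩ := h
      rcases List.mem_cons.1 hy with rfl | hy'
      · omega
      · simp only [List.foldl_cons, min_eq_left (by omega : b ≤ x)]
        obtain ⟨hm, hlt⟩ := ih b ⟨y, hy', hyb⟩
        exact ⟨by simp [hm], hlt⟩

-- characterisation of B's backward scan: running best = min-fold, offset = last argmin
lemma pvBScan (rs : List Int) : ∀ (b o0 i0 : Int),
    rs.foldl pvBStep (b, o0, i0) =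
      (rs.foldl min b,
       if ∃ x ∈ rs, x < b then i0 - (rs.idxOf (rs.foldl min b) : Int) else o0,
       i0 - rs.length) := by
  induction rs with
  | nil => intro b o0 i0; simp
  | cons x t ih =>
    intro b o0 i0
    by_cases hx : x < b
    · simp only [List.foldl_cons, pvBStep, if_pos hx, min_eq_right (le_of_lt hx)]
      rw [ih x i0 (i0 - 1)]
      have hex : ∃ y ∈ x :: t, y < b := ⟨x, by simp, hx⟩
      rw [if_pos hex]
      by_cases h2 : ∃ y ∈ t, y < x
      · rw [if_pos h2]
        have hlt : t.foldl min x < x := (pvFoldMin_mem_of_lt t x h2).2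
        have hne : (x == t.foldl min x) = false := by
          simp only [beq_eq_false_iff_ne]; omega
        rw [List.idxOf_cons, hne]
        simp only [cond_false]
        refine Prod.ext rfl (Prod.ext ?_ ?_) <;> push_cast <;> (first | omega | (simp; omega))
      · rw [if_neg h2]
        push_neg at h2
        rw [pvFoldMin_of_all_ge t x h2]
        rw [List.idxOf_cons]
        simp only [beq_self_eq_true, cond_true]
        refine Prod.ext rfl (Prod.ext ?_ ?_) <;> simp <;> omega
    · simp only [List.foldl_cons, pvBStep, if_neg hx, min_eq_left (by omega : b ≤ x)]
      rw [ih b o0 (i0 - 1)]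
      have hiff : (∃ y ∈ x :: t, y < b) ↔ (∃ y ∈ t, y < b) := by
        constructor
        · rintro ⟨y, hy, hyb⟩
          rcases List.mem_cons.1 hy with rfl | hy' <;> [omega; exact ⟨y, hy', hyb⟩]
        · rintro ⟨y, hy, hyb⟩; exact ⟨y, by simp [hy], hyb⟩
      by_cases h2 : ∃ y ∈ t, y < b
      · rw [if_pos h2, if_pos (hiff.2 h2)]
        have hlt : t.foldl min b < b := (pvFoldMin_mem_of_lt t b h2).2
        have hne : (x == t.foldl min b) = false := by
          simp only [beq_eq_false_iff_ne]; omega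
        rw [List.idxOf_cons, hne]
        simp only [cond_false]
        refine Prod.ext rfl (Prod.ext ?_ ?_) <;> push_cast <;> (first | omega | (simp; omega))
      · rw [if_neg h2, if_neg (fun h => h2 (hiff.1 h))]
        refine Prod.ext rfl (Prod.ext rfl ?_)
        simp; omega

-- characterisation of A's forward running-min loop: offset = last argmin
lemma pvAFold (ds : List Int) (K : Int) (hK : ∀ d ∈ ds, d ≤ K) :
    ds.foldl pvStep (K, 0, 0) =
      (ds.foldl min K,
       if ds.isEmpty then 0
       else (ds.length : Int) - 1 - (ds.reverse.idxOf (ds.foldl min K) : Int),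
       (ds.length : Int)) := by
  induction ds using List.reverseRecOn with
  | nil => simp
  | append_singleton ds d ih =>
    have hK' : ∀ x ∈ ds, x ≤ K := fun x hx => hK x (List.mem_append_left _ hx)
    have hd : d ≤ K := hK d (by simp)
    rw [List.foldl_append, List.foldl_append, ih hK']
    set M := ds.foldl min K with hM
    simp only [List.foldl_cons, List.foldl_nil]
    rw [List.reverse_append]
    simp only [List.reverse_singleton, List.singleton_append]
    by_cases hcase : M ≥ d
    · rw [show pvStep _ d = (d, (ds.length : Int), (ds.length : Int) + 1) from by
        simp [pvStep, if_pos hcase]]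
      have hmd : min M d = d := by omega
      rw [hmd, List.idxOf_cons]
      simp only [beq_self_eq_true, cond_true]
      refine Prod.ext rfl (Prod.ext ?_ ?_) <;> simp <;> omega
    · rw [show pvStep (M, if ds.isEmpty then 0 else (ds.length : Int) - 1 - (ds.reverse.idxOf M : Int), (ds.length : Int)) d
          = (M, if ds.isEmpty then 0 else (ds.length : Int) - 1 - (ds.reverse.idxOf M : Int), (ds.length : Int) + 1) from by
        simp [pvStep, if_neg hcase]]
      have hmd : min M d = M := by omega
      have hdsne : ds ≠ [] := by
        rintro rfl
        simp [hM] at hcase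
        omega
      have hne : (d == M) = false := by simp only [beq_eq_false_iff_ne]; omega
      rw [hmd, List.idxOf_cons, hne]
      simp only [cond_false, if_neg (by simp [hdsne] : ¬(ds ++ [d]).isEmpty = true),
        if_neg (by simp [hdsne] : ¬ds.isEmpty = true)]
      refine Prod.ext rfl (Prod.ext ?_ ?_) <;> push_cast <;> simp <;> omega

-- A's kmer list is the slice comprehension
lemma pvGenerateKmers_eq (sequence : List Char) (k : Int) :
    pvGenerateKmers sequence k =
      (PySem.List.pyRange 0 ((sequence.length : Int) - k + 1) 1).map
        (fun i => PySem.List.slice sequence (some i) (some (i + k))) := by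
  rw [pvGenerateKmers, PySem.List.foldl_append_singleton_eq_map]
  simp

-- A's mapped distance list, when the primer fits
lemma pvAList (narrow p : List Char) (h : p.length ≤ narrow.length) :
    (pvGenerateKmers narrow (p.length : Int)).map (fun kmer => pvHamDist kmer p) =
      pvWinDists narrow p := by
  rw [pvGenerateKmers_eq, List.map_map, PySem.List.pyRange_one]
  have ht : ((narrow.length : Int) - p.length + 1 - 0).toNat = narrow.length - p.length + 1 := by
    omega
  rw [ht, List.map_map, pvWinDists]
  apply List.map_congr_left
  intro i _
  simp only [Function.comp]
  rw [show (0 : Int) + (i : Int) = ((i : Nat) : Int) by ring, PySem.List.slice_natCast_add]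

-- Python enumerate, peeled one element at a time
lemma pvEnumCons {α : Type} (c : α) (q : List α) (s : Int) :
    PySem.List.enumerate (c :: q) s = (s, c) :: PySem.List.enumerate q (s + 1) := by
  simp [PySem.List.enumerate]

-- B's column fold computes the same distance list, when the primer fits
lemma pvBCols (narrow p : List Char) (h : p.length ≤ narrow.length) :
    (PySem.List.enumerate p 0).foldl
      (fun dists jpc =>
        List.zipWith (fun d c => d + (if c ≠ jpc.2 then (1 : Int) else 0)) dists
          (PySem.List.slice narrow (some jpc.1)
            (some (jpc.1 + ((narrow.length : Int) - p.length + 1)))))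
      (List.replicate ((narrow.length : Int) - p.length + 1).toNat 0) =
      pvWinDists narrow p := by
  have hMZ : (narrow.length : Int) - p.length + 1 = ((narrow.length - p.length + 1 : Nat) : Int) := by
    push_cast [h]; omega
  have hMt : ((narrow.length : Int) - p.length + 1).toNat = narrow.length - p.length + 1 := by omega
  have H : ∀ (q : List Char) (t : Nat), p.drop t = q →
      (PySem.List.enumerate q (t : Int)).foldl
        (fun dists jpc =>
          List.zipWith (fun d c => d + (if c ≠ jpc.2 then (1 : Int) else 0)) dists
            (PySem.List.slice narrow (some jpc.1)
              (some (jpc.1 + ((narrow.length : Int) - p.length + 1)))))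
        ((List.range (narrow.length - p.length + 1)).map
          (fun i => pvHamDist ((narrow.drop i).take p.length) (p.take t)))
      = pvWinDists narrow p := by
    intro q
    induction q with
    | nil =>
      intro t ht
      have hlen : p.length ≤ t := by
        by_contra hlt
        have := List.drop_eq_nil_iff.1 ht
        omega
      rw [List.take_of_length_le hlen]
      simp [pvWinDists]
    | cons c q' ih =>
      intro t ht
      have htlt : t < p.length := by
        by_contra hge
        rw [List.drop_eq_nil_of_le (by omega)] at ht
        simp at ht
      have hc : p[t]? = some c := by
        have := List.getElem?_drop (xs := p) (i := t) (j := 0)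
        rw [ht] at this
        simpa using this.symm
      have hq' : p.drop (t + 1) = q' := by
        rw [← List.tail_drop, ht]
        rfl
      rw [pvEnumCons, List.foldl_cons]
      have hstep :
          List.zipWith (fun d c' => d + (if c' ≠ c then (1 : Int) else 0))
            ((List.range (narrow.length - p.length + 1)).map
              (fun i => pvHamDist ((narrow.drop i).take p.length) (p.take t)))
            (PySem.List.slice narrow (some (t : Int))
              (some ((t : Int) + ((narrow.length : Int) - p.length + 1))))
          = (List.range (narrow.length - p.length + 1)).map
              (fun i => pvHamDist ((narrow.drop i).take p.length) (p.take (t + 1))) := by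
        rw [hMZ, PySem.List.slice_natCast_add]
        apply List.ext_getElem
        · simp [List.length_take, List.length_drop]
          omega
        · intro i hi1 hi2
          have hiM : i < narrow.length - p.length + 1 := by
            simp at hi2; omega
          have hcol : ((narrow.drop t).take (narrow.length - p.length + 1))[i]'(by
              simp [List.length_take, List.length_drop]; omega) = narrow[t + i]'(by omega) := by
            rw [List.getElem_take, List.getElem_drop]
          have htake1 : p.take (t + 1) = p.take t ++ [c] := by
            rw [List.take_add_one, hc]
            rfl
          have hsnoc := pvHamSnoc ((narrow.drop i).take p.length) (p.take t) c
            (by simp [List.length_take, List.length_drop]; omega)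
          simp only [List.getElem_zipWith, List.getElem_map, List.getElem_range, hcol]
          rw [htake1, hsnoc]
          have hpre : (p.take t).length = t := by simp; omega
          have hwlen : t < ((narrow.drop i).take p.length).length := by
            simp [List.length_take, List.length_drop]; omega
          have hgd : ((narrow.drop i).take p.length).getD (p.take t).length ' '
              = narrow[t + i]'(by omega) := by
            rw [hpre, List.getD_eq_getElem _ _ hwlen, List.getElem_take, List.getElem_drop]
            congr 1
            omega
          rw [hgd]
      rw [hstep, show ((t : Int) + 1) = (((t + 1 : Nat)) : Int) by push_cast; ring,
        ih (t + 1) hq']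
  have hrep : (List.replicate (narrow.length - p.length + 1) (0 : Int)) =
      (List.range (narrow.length - p.length + 1)).map
        (fun i => pvHamDist ((narrow.drop i).take p.length) (p.take 0)) := by
    simp [pvHamDist]
  have h0 := H p 0 (by simp)
  rw [hMt, hrep]
  exact h0

-- when the first list is empty every zipWith step keeps it empty
lemma pvFoldZipNil (l : List (Int × Char)) (narrow : List Char) (m : Int) :
    l.foldl (fun dists jpc =>
      List.zipWith (fun d c => d + (if c ≠ jpc.2 then (1 : Int) else 0)) dists
        (PySem.List.slice narrow (some jpc.1) (some (jpc.1 + m)))) [] = [] := by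
  induction l with
  | nil => rfl
  | cons x t ih => simpa using ih

-- k+1 vs k as the initial accumulator make no difference when every element is ≤ k
lemma pvFoldMin_succ (L : List Int) (K : Int) (hK : ∀ d ∈ L, d ≤ K) (hne : L ≠ []) :
    L.foldl min (K + 1) = L.foldl min K := by
  cases L with
  | nil => exact absurd rfl hne
  | cons x t =>
    have hx : x ≤ K := hK x (by simp)
    simp only [List.foldl_cons, min_eq_right hx, min_eq_right (by omega : x ≤ K + 1)]

-- a min-fold is invariant under reversal (min is right-commutative)
lemma pvFoldMin_reverse (L : List Int) (b : Int) : L.reverse.foldl min b = L.foldl min b := by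
  exact (List.reverse_perm L).foldl_eq (rcomm := ⟨fun a b c => min_right_comm a b c⟩) b

-- ===== VERDICT (by name: the statement is the Claim_ definition above) =====
theorem sec_check_spec : Claim_equal_sec_check := by
  intro low_bound up_bound primer_seq seq _
  unfold Spec_sec_check sec_check sec_check_alt
  simp only []
  set p := primer_seq.toList
  set s := seq.toList
  have hlb : (if low_bound - ((p.length : Int) - 1) < 0 then 0
      else low_bound - ((p.length : Int) - 1)) = max 0 (low_bound - ((p.length : Int) - 1)) := by
    split <;> omega
  have hub : (if up_bound + ((p.length : Int) - 1) > (s.length : Int) - 1 then (s.length : Int) - 1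
      else up_bound + ((p.length : Int) - 1)) =
      min ((s.length : Int) - 1) (up_bound + ((p.length : Int) - 1)) := by
    split <;> omega
  rw [hlb, hub]
  set narrow := PySem.List.slice s (some (max 0 (low_bound - ((p.length : Int) - 1))))
      (some (min ((s.length : Int) - 1) (up_bound + ((p.length : Int) - 1))))
  by_cases hk : p.length ≤ narrow.length
  · -- the primer fits: both sides work on the same nonempty distance list
    set L := pvWinDists narrow p with hL
    have hLlen : L.length = narrow.length - p.length + 1 := by simp [hL, pvWinDists]
    have hLne : L ≠ [] := by
      intro hnil
      rw [hnil] at hLlen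
      simp at hLlen
    have hK : ∀ d ∈ L, d ≤ (p.length : Int) := by
      intro d hd
      rw [hL, pvWinDists] at hd
      obtain ⟨i, _, rfl⟩ := List.mem_map.1 hd
      exact pvHamDist_le _ p
    have hKr : ∀ d ∈ L.reverse, d ≤ (p.length : Int) := by
      intro d hd
      exact hK d (List.mem_reverse.1 hd)
    have hAfold :
        (pvGenerateKmers narrow (p.length : Int)).foldl
            (fun st kmer => pvStep st (pvHamDist kmer p)) ((p.length : Int), 0, 0) =
          L.foldl pvStep ((p.length : Int), 0, 0) := by
      rw [← List.foldl_map (f := fun kmer => pvHamDist kmer p) (g := pvStep), pvAList narrow p hk]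
    have hBdists :
        (PySem.List.enumerate p 0).foldl
          (fun dists jpc =>
            List.zipWith (fun d c => d + (if c ≠ jpc.2 then (1 : Int) else 0)) dists
              (PySem.List.slice narrow (some jpc.1)
                (some (jpc.1 + ((narrow.length : Int) - (p.length : Int) + 1)))))
          (List.replicate ((narrow.length : Int) - (p.length : Int) + 1).toNat 0) = L :=
      pvBCols narrow p hk
    rw [hAfold, hBdists, pvAFold L (p.length : Int) hK, pvBScan L.reverse]
    have hmin : L.reverse.foldl min ((p.length : Int) + 1) = L.foldl min (p.length : Int) := by
      rw [pvFoldMin_reverse]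
      exact pvFoldMin_succ L (p.length : Int) hK hLne
    have hex : ∃ x ∈ L.reverse, x < (p.length : Int) + 1 := by
      obtain ⟨x, hx⟩ := List.exists_mem_of_ne_nil L hLne
      exact ⟨x, List.mem_reverse.2 hx, by have := hK x hx; omega⟩
    rw [if_pos hex, if_neg (by simp [hLne] : ¬L.isEmpty = true), hmin]
    have hlen : (narrow.length : Int) - (p.length : Int) + 1 - 1 = (L.length : Int) - 1 := by
      rw [hLlen]
      push_cast [hk]
      omega
    rw [hlen]
  · -- the primer does not fit: the distance list is empty on both sides, offset 0
    push_neg at hk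
    have hmz : (narrow.length : Int) - (p.length : Int) + 1 ≤ 0 := by omega
    have hA : pvGenerateKmers narrow (p.length : Int) = [] := by
      rw [pvGenerateKmers, PySem.List.pyRange_one_eq_nil (by omega)]
      rfl
    have hrep : List.replicate ((narrow.length : Int) - (p.length : Int) + 1).toNat (0 : Int) = [] := by
      rw [Int.toNat_of_nonpos hmz]
      rfl
    rw [hA, hrep, pvFoldZipNil]
    rfl
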